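-- pv_equiv track=rewrite | github.com/m-ghosal/toa-projects | beach_day.py | solve
-- ===== SOURCE A (Python) =====
-- def solve(N, a, b, c, scores):
--     dp = [quadratic_exp(a, b, c, scores[0])]
--     for i in range(1, N):
--         max_value = float('-inf')
--         sum_scores = 0
--         for j in range(-1, i):
--             sum_scores+=scores[j + 1]
--         for k in range(0, i+1):
--             if k == 0:
--                 if quadratic_exp(a, b, c, sum_scores) > max_value:
--                     max_value = quadratic_exp(a, b, c, sum_scores)
--             else:
--                 sum_scores -= scores[k - 1]
--                 if dp[k - 1] + quadratic_exp(a, b, c, sum_scores) > max_value: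
--                     max_value = dp[k-1] + quadratic_exp(a, b, c, sum_scores)
--         dp.append(max_value)
--
--     return dp[-1]
--
-- def quadratic_exp(a, b, c, x):
--     return a*(x**2) + b*x + c
-- ===== SOURCE B (Python) =====
-- def solve(N, a, b, c, scores):
--     # Li Chao tree over the lines obtained by expanding f(P_i - P_k):
--     # dp[i] = a*P^2 + b*P + c + max_k (dp[k-1] + a*Pk^2 - b*Pk - 2*a*Pk*P), P = prefix[i+1].
--     def insert(t, lo, hi, m, q):
--         if t is None:
--             return (m, q, None, None)
--         um, uq, L, R = t
--         mid = (lo + hi) // 2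
--         if m * mid + q > um * mid + uq:
--             m, q, um, uq = um, uq, m, q
--         if lo < hi:
--             if m * lo + q > um * lo + uq:
--                 L = insert(L, lo, mid, m, q)
--             else:
--                 R = insert(R, mid + 1, hi, m, q)
--         return (um, uq, L, R)
--
--     def query(t, lo, hi, x):
--         if t is None:
--             return None
--         um, uq, L, R = t
--         res = um * x + uq
--         if lo < hi:
--             mid = (lo + hi) // 2
--             sub = query(L, lo, mid, x) if x <= mid else query(R, mid + 1, hi, x)
--             if sub is not None and sub > res:
--                 res = sub
--         return res
--
--     prefix = [0]
--     for s in scores[:N]: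
--         prefix.append(prefix[-1] + s)
--     lo = min(prefix)
--     hi = max(prefix)
--     prev = a * scores[0] ** 2 + b * scores[0] + c
--     t = insert(None, lo, hi, 0, 0)          # line for k = 0
--     for i in range(1, N):
--         Pi = prefix[i]
--         t = insert(t, lo, hi, -2 * a * Pi, prev + a * Pi * Pi - b * Pi)
--         P = prefix[i + 1]
--         prev = a * P * P + b * P + c + query(t, lo, hi, P)
--     return prev
-- ===== Notes on version B (the rewrite author's own statement) =====
-- stated objective: faster
-- what changed: B expands the quadratic of the segment sum into a line in the prefix sum, dp[i] = aP^2+bP+c + max_k(dp[k-1]+a*Pk^2-b*Pk-2a*Pk*P), and maintains those lines in a Li Chao tree over the prefix-sum range, replacing A's O(N) inner scan per i by one O(log V) insert and one O(log V) query.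
import Mathlib
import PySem

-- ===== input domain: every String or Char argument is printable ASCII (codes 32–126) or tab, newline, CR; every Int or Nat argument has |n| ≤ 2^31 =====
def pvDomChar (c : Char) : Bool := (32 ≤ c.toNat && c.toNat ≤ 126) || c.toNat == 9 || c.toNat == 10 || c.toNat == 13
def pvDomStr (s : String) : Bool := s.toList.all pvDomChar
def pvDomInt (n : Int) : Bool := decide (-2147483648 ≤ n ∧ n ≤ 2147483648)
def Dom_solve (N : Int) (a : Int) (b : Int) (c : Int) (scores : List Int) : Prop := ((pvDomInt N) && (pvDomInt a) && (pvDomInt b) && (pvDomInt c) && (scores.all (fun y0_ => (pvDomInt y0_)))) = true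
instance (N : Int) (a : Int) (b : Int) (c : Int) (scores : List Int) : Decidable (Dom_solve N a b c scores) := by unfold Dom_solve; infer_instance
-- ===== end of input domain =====

-- B expands each segment score f(P_i - P_k) into a line in the prefix sum and keeps the candidate
-- lines in a Li Chao tree, replacing A's O(N) inner scan per position by one insert and one query
-- (objective: faster; a timing run measures the speed-up).

-- ===== PORT A =====
-- quadratic_exp(a, b, c, x)
def pvQuad (a : Int) (b : Int) (c : Int) (x : Int) : Int := a * (x ^ 2) + b * x + c

-- 'v > max_value' where max_value starts at float('-inf') (none = -inf)
def pvGtNegInf (m : Option Int) (v : Int) : Bool :=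
  match m with
  | none => true
  | some m => decide (m < v)

def solve (N : Int) (a : Int) (b : Int) (c : Int) (scores : List Int) : Int :=
  let dp0 : List Int := [pvQuad a b c (PySem.List.pyGetD scores 0 0)]
  let dp := (PySem.List.pyRange 1 N 1).foldl (fun dp i =>
    let sum0 : Int := (PySem.List.pyRange (-1) i 1).foldl
      (fun s j => s + PySem.List.pyGetD scores (j + 1) 0) 0
    let st := (PySem.List.pyRange 0 (i + 1) 1).foldl
      (fun (st : Option Int × Int) k =>
        if k = 0 then
          let v := pvQuad a b c st.2
          (if pvGtNegInf st.1 v then some v else st.1, st.2)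
        else
          let s' := st.2 - PySem.List.pyGetD scores (k - 1) 0
          let v := PySem.List.pyGetD dp (k - 1) 0 + pvQuad a b c s'
          (if pvGtNegInf st.1 v then some v else st.1, s'))
      (none, sum0)
    -- dp.append(max_value); for i ≥ 1 the k = 0 step always sets max_value, so .getD 0 is never the -inf case
    dp ++ [st.1.getD 0]) dp0
  PySem.List.pyGetD dp (-1) 0

-- ===== PORT B =====
-- Li Chao tree node: line m*x+q and two children ('None' child = .empty)
inductive LCT : Type
  | empty : LCT
  | node : Int → Int → LCT → LCT → LCT
deriving DecidableEq, Repr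

-- Source B insert(t, lo, hi, m, q); the Python recursion on integer halves is structural on the tree here
def lctInsert : LCT → Int → Int → Int → Int → LCT
  | .empty, _, _, m, q => .node m q .empty .empty
  | .node um uq L R, lo, hi, m, q =>
    let mid := PySem.Int.floordiv (lo + hi) 2
    match (if m * mid + q > um * mid + uq then (um, uq, m, q) else (m, q, um, uq)) with
    | (m', q', um', uq') =>
      if lo < hi then
        if m' * lo + q' > um' * lo + uq' then .node um' uq' (lctInsert L lo mid m' q') R
        else .node um' uq' L (lctInsert R (mid + 1) hi m' q')
      else .node um' uq' L R

-- Source B query(t, lo, hi, x); returns none exactly where the Python returns None (empty subtree)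
def lctQuery : LCT → Int → Int → Int → Option Int
  | .empty, _, _, _ => none
  | .node um uq L R, lo, hi, x =>
    let res := um * x + uq
    if lo < hi then
      let mid := PySem.Int.floordiv (lo + hi) 2
      match (if x ≤ mid then lctQuery L lo mid x else lctQuery R (mid + 1) hi x) with
      | some s => some (if s > res then s else res)
      | none => some res
    else some res

def solve_alt (N : Int) (a : Int) (b : Int) (c : Int) (scores : List Int) : Int :=
  let pre := (PySem.List.slice scores none (some N)).foldl
    (fun p s => p ++ [PySem.List.pyGetD p (-1) 0 + s]) [(0 : Int)]
  -- min(prefix) / max(prefix): prefix is nonempty, so the .getD defaults are never used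
  let lo := (PySem.List.min? pre (fun y => y)).getD 0
  let hi := (PySem.List.max? pre (fun y => y)).getD 0
  let s0 := PySem.List.pyGetD scores 0 0
  let st := (PySem.List.pyRange 1 N 1).foldl
    (fun (st : LCT × Int) i =>
      let Pi := PySem.List.pyGetD pre i 0
      let t := lctInsert st.1 lo hi (-2 * a * Pi) (st.2 + a * Pi * Pi - b * Pi)
      let P := PySem.List.pyGetD pre (i + 1) 0
      -- query(t, lo, hi, P) is never None here (the tree holds the k = 0 line): .getD 0 is safe
      (t, a * P * P + b * P + c + (lctQuery t lo hi P).getD 0))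
    (lctInsert .empty lo hi 0 0, a * s0 ^ 2 + b * s0 + c)
  st.2

-- ===== PRECONDITION & SPEC =====
-- Pre_ excludes exactly the inputs on which A raises IndexError: empty scores (dp[0] init) or N > len(scores) (the inner summation reads scores[i]).
def Pre_solve (N : Int) (a : Int) (b : Int) (c : Int) (scores : List Int) : Prop :=
  scores ≠ [] ∧ N ≤ (scores.length : Int)
instance (N : Int) (a : Int) (b : Int) (c : Int) (scores : List Int) : Decidable (Pre_solve N a b c scores) := by unfold Pre_solve; infer_instance

def pvWitness_solve : Int × Int × Int × Int × List Int := (2, 1, 0, 0, [1, 2])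

def Spec_solve (N : Int) (a : Int) (b : Int) (c : Int) (scores : List Int) (out : Int) : Prop := out = solve_alt N a b c scores
instance (N : Int) (a : Int) (b : Int) (c : Int) (scores : List Int) (out : Int) : Decidable (Spec_solve N a b c scores out) := by unfold Spec_solve; infer_instance

-- ===== CLAIM (what is proved, stated in full; the proofs are below) =====
def Claim_equal_solve : Prop := ∀ (N : Int) (a : Int) (b : Int) (c : Int) (scores : List Int), Dom_solve N a b c scores → Pre_solve N a b c scores → Spec_solve N a b c scores (solve N a b c scores)

-- ===== LEMMAS AND PROOFS =====

-- f(x) in B's expansion, written as A's helper sees it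
def pvF (a : Int) (b : Int) (c : Int) (x : Int) : Int := a * x * x + b * x + c

theorem pvQuad_eq_pvF (a b c x : Int) : pvQuad a b c x = pvF a b c x := by
  unfold pvQuad pvF; ring

-- prefix sum of the first k scores
def psum (scores : List Int) (k : Nat) : Int := (scores.take k).sum

-- the k-th candidate in A's inner loop at outer index m (segment (k..m], dp[k-1] before it)
def Tf (a b c : Int) (scores dp : List Int) (m k : Nat) : Int :=
  (if k = 0 then 0 else dp.getD (k - 1) 0) + pvF a b c (psum scores (m + 1) - psum scores k)

def maxExpr (a b c : Int) (scores dp : List Int) (m : Nat) : Int :=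
  ((List.range m).map (fun k => Tf a b c scores dp m (k + 1))).foldl max (Tf a b c scores dp m 0)

-- abstract dp table: dpList j = A's dp after outer iterations 1..j
def dpList (a b c : Int) (scores : List Int) : Nat → List Int
  | 0 => [pvQuad a b c (PySem.List.pyGetD scores 0 0)]
  | j + 1 => dpList a b c scores j ++ [maxExpr a b c scores (dpList a b c scores j) (j + 1)]

def dpVal (a b c : Int) (scores : List Int) (j : Nat) : Int := (dpList a b c scores j).getD j 0

-- the line B inserts for cut position k, evaluated at x
def lineEval (a b c : Int) (scores : List Int) (k : Nat) (x : Int) : Int :=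
  (-2 * a * psum scores k) * x +
    ((if k = 0 then 0 else dpVal a b c scores (k - 1)) +
      a * psum scores k * psum scores k - b * psum scores k)

-- 'max of an optional previous best and a new value'
def omax : Option Int → Int → Int
  | none, v => v
  | some s, v => max s v

theorem take_succ_sum (xs : List Int) (t : Nat) :
    (xs.take (t + 1)).sum = (xs.take t).sum + xs.getD t 0 := by
  rw [List.take_succ, List.sum_append, List.getD_eq_getElem?_getD]
  cases xs[t]? <;> simp

theorem sum_range_getD (xs : List Int) : ∀ (t : Nat) (init : Int),
    (List.range t).foldl (fun s k => s + xs.getD k 0) init = init + (xs.take t).sum := by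
  intro t
  induction t with
  | zero => simp
  | succ t ih =>
    intro init
    rw [List.range_succ, List.foldl_append, ih, take_succ_sum]
    simp [add_assoc]

theorem pre_fold_spec (xs : List Int) : ∀ (acc : List Int) (L : Int),
    PySem.List.pyGetD acc (-1) 0 = L →
    xs.foldl (fun p s => p ++ [PySem.List.pyGetD p (-1) 0 + s]) acc
      = acc ++ (List.range xs.length).map (fun j => L + (xs.take (j + 1)).sum) := by
  induction xs with
  | nil => intro acc L _; simp
  | cons x xs ih =>
    intro acc L hL
    have h1 : PySem.List.pyGetD (acc ++ [L + x]) (-1) 0 = L + x :=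
      PySem.List.pyGetD_neg_one_append_singleton acc (L + x) 0
    simp only [List.foldl_cons, hL]
    rw [ih (acc ++ [L + x]) (L + x) h1, List.append_assoc]
    congr 1
    rw [List.length_cons, List.range_succ_eq_map, List.map_cons, List.map_map,
        List.map_congr_left (show ∀ a ∈ List.range xs.length,
          ((fun j => L + ((x :: xs).take (j + 1)).sum) ∘ Nat.succ) a
            = (fun j => L + x + (xs.take (j + 1)).sum) a by
          intro k _
          simp only [Function.comp_apply, List.take_succ_cons, List.sum_cons]
          ring)]
    simp

-- the prefix list B builds is the table of partial sums
theorem preList_eq (xs : List Int) :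
    xs.foldl (fun p s => p ++ [PySem.List.pyGetD p (-1) 0 + s]) [(0 : Int)]
      = (List.range (xs.length + 1)).map (fun j => (xs.take j).sum) := by
  rw [pre_fold_spec xs [(0 : Int)] 0 (by decide)]
  rw [List.range_succ_eq_map, List.map_cons, List.map_map]
  simp

theorem if_lt_eq_max (M v : Int) : (if M < v then v else M) = max M v := by
  split_ifs with h
  · exact (max_eq_right h.le).symm
  · exact (max_eq_left (not_lt.mp h)).symm

-- a linear function nonnegative at both ends of an interval is nonnegative inside it
theorem lin_two_pt (dm dq lo hi x : Int) (h1 : 0 ≤ dm * lo + dq) (h2 : 0 ≤ dm * hi + dq)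
    (hlo : lo ≤ x) (hhi : x ≤ hi) : 0 ≤ dm * x + dq := by
  rcases le_or_gt 0 dm with h | h
  · have := mul_le_mul_of_nonneg_left hlo h
    linarith
  · have := mul_le_mul_of_nonpos_left hhi h.le
    linarith

-- a linear function negative at lo and nonnegative at mid ≥ lo stays nonnegative beyond mid
theorem lin_mono_dom (dm dq lo mid x : Int) (h1 : dm * lo + dq < 0) (h2 : 0 ≤ dm * mid + dq)
    (hlomid : lo ≤ mid) (hx : mid ≤ x) : 0 ≤ dm * x + dq := by
  have h3 : dm * lo < dm * mid := by linarith
  have h4 : 0 < dm := by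
    rcases le_or_gt dm 0 with h | h
    · exact absurd (mul_le_mul_of_nonpos_left hlomid h) (not_le.mpr h3)
    · exact h
  have := mul_le_mul_of_nonneg_left hx h4.le
  linarith


theorem lct_mid_bounds (lo hi : Int) (h : lo < hi) :
    lo ≤ PySem.Int.floordiv (lo + hi) 2 ∧ PySem.Int.floordiv (lo + hi) 2 < hi := by
  constructor
  · rw [PySem.Int.le_floordiv_iff_mul_le (by omega)]; omega
  · rw [PySem.Int.floordiv_lt_iff_lt_mul (by omega)]; omega

-- the pushed line loses to the kept line at lo and wins nowhere right of mid
theorem line_dom_right (w1 w2 p1 p2 lo mid x : Int)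
    (hlo : w1 * lo + w2 < p1 * lo + p2) (hmid : p1 * mid + p2 ≤ w1 * mid + w2)
    (hlomid : lo ≤ mid) (hx : mid ≤ x) : p1 * x + p2 ≤ w1 * x + w2 := by
  have h := lin_mono_dom (w1 - p1) (w2 - p2) lo mid x (by linarith) (by linarith) hlomid hx
  linarith

-- the pushed line loses to the kept line at both lo and mid, hence everywhere between
theorem line_dom_left (w1 w2 p1 p2 lo mid x : Int)
    (hlo : p1 * lo + p2 ≤ w1 * lo + w2) (hmid : p1 * mid + p2 ≤ w1 * mid + w2)
    (h1 : lo ≤ x) (h2 : x ≤ mid) : p1 * x + p2 ≤ w1 * x + w2 := by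
  have h := lin_two_pt (w1 - p1) (w2 - p2) lo mid x (by linarith) (by linarith) h1 h2
  linarith

-- a node's two lines enter the combined maximum symmetrically
theorem omax_node_swap (L R : LCT) (lo hi x m q um uq : Int) :
    omax (lctQuery (LCT.node um uq L R) lo hi x) (m * x + q)
      = omax (lctQuery (LCT.node m q L R) lo hi x) (um * x + uq) := by
  simp only [lctQuery]
  by_cases hlh : lo < hi
  · rw [if_pos hlh, if_pos hlh]
    cases h : (if x ≤ PySem.Int.floordiv (lo + hi) 2
        then lctQuery L lo (PySem.Int.floordiv (lo + hi) 2) x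
        else lctQuery R (PySem.Int.floordiv (lo + hi) 2 + 1) hi x) with
    | none => simp [omax, max_comm]
    | some s => simp [omax, if_lt_eq_max, max_comm, max_left_comm, max_assoc]
  · rw [if_neg hlh, if_neg hlh]
    simp [omax, max_comm]

-- one node step of the exchange law, after the swap has been resolved:
-- (m', q') is the pushed line, (um', uq') the kept line, kept dominates at mid
theorem lct_insert_node_step (L R : LCT)
    (ihL : ∀ (lo hi m q x : Int), lo ≤ x → x ≤ hi →
      lctQuery (lctInsert L lo hi m q) lo hi x = some (omax (lctQuery L lo hi x) (m * x + q)))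
    (ihR : ∀ (lo hi m q x : Int), lo ≤ x → x ≤ hi →
      lctQuery (lctInsert R lo hi m q) lo hi x = some (omax (lctQuery R lo hi x) (m * x + q)))
    (lo hi x m' q' um' uq' : Int) (hlh : lo < hi) (hlo : lo ≤ x) (hhi : x ≤ hi)
    (hdom : m' * (PySem.Int.floordiv (lo + hi) 2) + q'
              ≤ um' * (PySem.Int.floordiv (lo + hi) 2) + uq') :
    lctQuery (if m' * lo + q' > um' * lo + uq'
        then LCT.node um' uq' (lctInsert L lo (PySem.Int.floordiv (lo + hi) 2) m' q') R
        else LCT.node um' uq' L (lctInsert R (PySem.Int.floordiv (lo + hi) 2 + 1) hi m' q'))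
      lo hi x
      = some (omax (lctQuery (LCT.node um' uq' L R) lo hi x) (m' * x + q')) := by
  obtain ⟨hmlo, hmhi⟩ := lct_mid_bounds lo hi hlh
  set mid := PySem.Int.floordiv (lo + hi) 2 with hmiddef
  by_cases hside : m' * lo + q' > um' * lo + uq'
  · rw [if_pos hside]
    simp only [lctQuery]
    rw [if_pos hlh, if_pos hlh]
    by_cases hx : x ≤ mid
    · rw [if_pos hx, if_pos hx, ihL lo mid m' q' x hlo hx]
      cases hQ : lctQuery L lo mid x with
      | none => simp only [omax, if_lt_eq_max]
      | some s =>
        simp only [omax, if_lt_eq_max]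
        rw [max_assoc]
    · rw [if_neg hx, if_neg hx]
      have hBA : m' * x + q' ≤ um' * x + uq' :=
        line_dom_right um' uq' m' q' lo mid x hside hdom hmlo (by omega)
      cases hQ : lctQuery R (mid + 1) hi x with
      | none =>
        simp only [omax, if_lt_eq_max]
        rw [max_eq_left hBA]
      | some s =>
        simp only [omax, if_lt_eq_max]
        rw [max_eq_left (hBA.trans (le_max_left _ _))]
  · rw [if_neg hside]
    simp only [lctQuery]
    rw [if_pos hlh, if_pos hlh]
    by_cases hx : x ≤ mid
    · rw [if_pos hx, if_pos hx]
      have hBA : m' * x + q' ≤ um' * x + uq' :=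
        line_dom_left um' uq' m' q' lo mid x (by omega) hdom hlo hx
      cases hQ : lctQuery L lo mid x with
      | none =>
        simp only [omax, if_lt_eq_max]
        rw [max_eq_left hBA]
      | some s =>
        simp only [omax, if_lt_eq_max]
        rw [max_eq_left (hBA.trans (le_max_left _ _))]
    · rw [if_neg hx, if_neg hx, ihR (mid + 1) hi m' q' x (by omega) hhi]
      cases hQ : lctQuery R (mid + 1) hi x with
      | none => simp only [omax, if_lt_eq_max]
      | some s =>
        simp only [omax, if_lt_eq_max]
        rw [max_assoc]

theorem lct_query_insert : ∀ (t : LCT) (lo hi m q x : Int), lo ≤ x → x ≤ hi →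
    lctQuery (lctInsert t lo hi m q) lo hi x = some (omax (lctQuery t lo hi x) (m * x + q)) := by
  intro t
  induction t with
  | empty =>
    intro lo hi m q x hlo hhi
    simp only [lctInsert, lctQuery, omax]
    by_cases h : lo < hi
    · rw [if_pos h, ite_self]
    · rw [if_neg h]
  | node um uq L R ihL ihR =>
    intro lo hi m q x hlo hhi
    simp only [lctInsert]
    set mid := PySem.Int.floordiv (lo + hi) 2 with hmiddef
    by_cases hsw : m * mid + q > um * mid + uq
    · rw [if_pos hsw]
      by_cases hlh : lo < hi
      · rw [if_pos hlh]
        have h := lct_insert_node_step L R ihL ihR lo hi x um uq m q hlh hlo hhi (le_of_lt hsw)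
        simp only [← hmiddef] at h
        rw [h, omax_node_swap]
      · rw [if_neg hlh]
        have hx : x = lo := by omega
        have hmidlo : mid = lo := by
          rw [hmiddef, PySem.Int.floordiv_eq_iff_of_pos (by omega)]; omega
        simp only [lctQuery, if_neg hlh, omax]
        subst hx; rw [hmidlo] at hsw
        rw [max_eq_right hsw.le]
    · rw [if_neg hsw]
      by_cases hlh : lo < hi
      · rw [if_pos hlh]
        have h := lct_insert_node_step L R ihL ihR lo hi x m q um uq hlh hlo hhi (not_lt.mp hsw)
        simp only [← hmiddef] at h
        rw [h]
      · rw [if_neg hlh]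
        have hx : x = lo := by omega
        have hmidlo : mid = lo := by
          rw [hmiddef, PySem.Int.floordiv_eq_iff_of_pos (by omega)]; omega
        simp only [lctQuery, if_neg hlh, omax]
        subst hx; rw [hmidlo] at hsw
        rw [max_eq_left (not_lt.mp hsw)]

-- A's loop body and B's loop body as named step functions (proof-side names for the lambdas in the ports)
def stepA (a b c : Int) (scores : List Int) (dp : List Int) (i : Int) : List Int :=
  let sum0 : Int := (PySem.List.pyRange (-1) i 1).foldl
    (fun s j => s + PySem.List.pyGetD scores (j + 1) 0) 0
  let st := (PySem.List.pyRange 0 (i + 1) 1).foldl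
    (fun (st : Option Int × Int) k =>
      if k = 0 then
        let v := pvQuad a b c st.2
        (if pvGtNegInf st.1 v then some v else st.1, st.2)
      else
        let s' := st.2 - PySem.List.pyGetD scores (k - 1) 0
        let v := PySem.List.pyGetD dp (k - 1) 0 + pvQuad a b c s'
        (if pvGtNegInf st.1 v then some v else st.1, s'))
    (none, sum0)
  dp ++ [st.1.getD 0]

def stepB (a b c lo hi : Int) (pre : List Int) (st : LCT × Int) (i : Int) : LCT × Int :=
  let Pi := PySem.List.pyGetD pre i 0
  let t := lctInsert st.1 lo hi (-2 * a * Pi) (st.2 + a * Pi * Pi - b * Pi)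
  let P := PySem.List.pyGetD pre (i + 1) 0
  (t, a * P * P + b * P + c + (lctQuery t lo hi P).getD 0)

theorem dpList_length (a b c : Int) (scores : List Int) (j : Nat) :
    (dpList a b c scores j).length = j + 1 := by
  induction j with
  | zero => rfl
  | succ j ih => simp [dpList, ih]

theorem dpList_ne_nil (a b c : Int) (scores : List Int) (j : Nat) :
    dpList a b c scores j ≠ [] := by
  have := dpList_length a b c scores j
  intro h; rw [h] at this; simp at this

theorem dpList_getD_stable (a b c : Int) (scores : List Int) :
    ∀ j k : Nat, k ≤ j → (dpList a b c scores j).getD k 0 = dpVal a b c scores k := by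
  intro j
  induction j with
  | zero => intro k hk; interval_cases k; rfl
  | succ j ih =>
    intro k hk
    rcases Nat.lt_or_ge k (j + 1) with h | h
    · show (dpList a b c scores j ++ [_]).getD k 0 = _
      rw [List.getD_append _ _ _ _ (by rw [dpList_length]; omega)]
      exact ih k (by omega)
    · have hk1 : k = j + 1 := by omega
      subst hk1; rfl

theorem dpList_last (a b c : Int) (scores : List Int) (j : Nat) :
    PySem.List.pyGetD (dpList a b c scores j) (-1) 0 = dpVal a b c scores j := by
  rw [PySem.List.pyGetD_neg_one (dpList a b c scores j) 0 (dpList_ne_nil a b c scores j)]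
  rw [List.getLast_eq_getElem, dpVal, List.getD_eq_getElem _ _ (by rw [dpList_length]; omega)]
  simp [dpList_length]

-- A's step at outer index i appends the max over all last-cut positions
theorem stepA_eq (a b c : Int) (scores : List Int) (dp : List Int) (i : Int)
    (hi : 1 ≤ i) : stepA a b c scores dp i = dp ++ [maxExpr a b c scores dp i.toNat] := by
  have him : i = (i.toNat : Int) := (Int.toNat_of_nonneg (by omega)).symm
  set m := i.toNat with hmdef
  have hm1 : 1 ≤ m := by omega
  set S : Int := (scores.take (m + 1)).sum with hSdef
  have hSpsum : S = psum scores (m + 1) := rfl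
  set T : Nat → Int := fun k => Tf a b c scores dp m k with hTdef
  have hTexp : ∀ k, T k = (if k = 0 then 0 else dp.getD (k - 1) 0)
      + pvF a b c (S - (scores.take k).sum) := by
    intro k; rfl
  -- A's initial summation loop computes the total prefix sum S
  have hsum0 : (PySem.List.pyRange (-1) i 1).foldl
      (fun s j => s + PySem.List.pyGetD scores (j + 1) 0) 0 = S := by
    rw [him, PySem.List.pyRange_one, show ((m : Int) - (-1)).toNat = m + 1 by omega,
        List.foldl_map]
    have hf : (fun (s : Int) (k : Nat) => s + PySem.List.pyGetD scores (-1 + (k : Int) + 1) 0)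
        = fun (s : Int) (k : Nat) => s + scores.getD k 0 := by
      funext s k
      rw [show (-1 + (k : Int) + 1) = (k : Int) by ring, PySem.List.pyGetD_natCast]
    rw [hf, sum_range_getD, zero_add]
  have hrangeA : PySem.List.pyRange 0 (i + 1) 1
      = (List.range (m + 1)).map (fun k : Nat => (k : Int)) := by
    rw [PySem.List.pyRange_one, show ((i + 1) - 0).toNat = m + 1 by omega]
    apply List.map_congr_left
    intro k _
    simp
  set stepK : Option Int × Int → Int → Option Int × Int := fun st k =>
      if k = 0 then
        let v := pvQuad a b c st.2
        (if pvGtNegInf st.1 v then some v else st.1, st.2)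
      else
        let s' := st.2 - PySem.List.pyGetD scores (k - 1) 0
        let v := PySem.List.pyGetD dp (k - 1) 0 + pvQuad a b c s'
        (if pvGtNegInf st.1 v then some v else st.1, s')
    with hstepK
  have hinner : ∀ t : Nat, t ≤ m →
      (List.range (t + 1)).foldl (fun st (k : Nat) => stepK st (k : Int)) (none, S)
        = (some (((List.range t).map (fun k => T (k + 1))).foldl max (T 0)),
           S - (scores.take t).sum) := by
    intro t
    induction t with
    | zero =>
      intro _
      simp only [List.range_one, List.foldl_nil, List.range_zero,
        List.map_nil, hstepK, hTdef]
      norm_num [pvGtNegInf, pvQuad_eq_pvF, Tf, psum, hSpsum]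
    | succ t ih =>
      intro ht
      rw [List.range_succ, List.foldl_append, ih (by omega)]
      simp only [List.foldl_cons, List.foldl_nil, hstepK]
      rw [if_neg (by exact_mod_cast Nat.succ_ne_zero t)]
      have hidx : ((t : Int) + 1) - 1 = ((t : Nat) : Int) := by ring
      simp only [Nat.cast_add, Nat.cast_one, hidx, PySem.List.pyGetD_natCast]
      have hseg : S - (scores.take t).sum - scores.getD t 0 = S - (scores.take (t + 1)).sum := by
        rw [take_succ_sum]; ring
      have hv : dp.getD t 0 + pvQuad a b c (S - (scores.take t).sum - scores.getD t 0)
          = T (t + 1) := by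
        rw [hseg, hTexp (t + 1)]
        simp [pvQuad_eq_pvF, psum]
      rw [Prod.mk.injEq]
      constructor
      · rw [hv]
        simp only [pvGtNegInf, decide_eq_true_eq, List.range_succ, List.map_append,
          List.foldl_append, List.map_cons, List.map_nil, List.foldl_cons, List.foldl_nil]
        rw [← apply_ite some, if_lt_eq_max]
      · rw [hseg]
  show dp ++ [_] = dp ++ [_]
  congr 1
  rw [hrangeA, hsum0, List.foldl_map, hinner m (le_refl m)]
  rfl

-- A's whole loop builds the abstract dp table
theorem foldA_eq (a b c N : Int) (scores : List Int) :
    ∀ j : Nat, (j : Int) ≤ N - 1 →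
      (List.range j).foldl (fun dp (k : Nat) => stepA a b c scores dp (1 + (k : Int)))
          (dpList a b c scores 0)
        = dpList a b c scores j := by
  intro j
  induction j with
  | zero => intro _; rfl
  | succ j ih =>
    intro hj
    rw [List.range_succ, List.foldl_append, ih (by push_cast at hj ⊢; omega),
        List.foldl_cons, List.foldl_nil,
        stepA_eq a b c scores _ _ (by push_cast; omega)]
    show _ = dpList a b c scores (j + 1)
    rw [show ((1 : Int) + (j : Nat)).toNat = j + 1 by omega]
    rfl

theorem foldl_max_map_add {α : Type} (l : List α) (f : α → Int) (C : Int) :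
    ∀ i : Int, C + (l.map f).foldl max i = (l.map (fun x => C + f x)).foldl max (C + i) := by
  induction l with
  | nil => intro i; rfl
  | cons x l ih =>
    intro i
    simp only [List.map_cons, List.foldl_cons]
    rw [ih (max i (f x)), max_add_add_left]

-- B's loop invariant: the carried value is A's latest dp entry, and the tree answers the
-- pointwise maximum of all inserted cut lines
theorem foldB_inv (a b c lo hi N : Int) (scores pre : List Int)
    (hpre : ∀ k : Nat, (k : Int) ≤ N → PySem.List.pyGetD pre (k : Int) 0 = psum scores k)
    (hlo : ∀ k : Nat, (k : Int) ≤ N → lo ≤ psum scores k)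
    (hhi : ∀ k : Nat, (k : Int) ≤ N → psum scores k ≤ hi) :
    ∀ j : Nat, (j : Int) ≤ N - 1 →
      (((List.range j).foldl (fun st (k : Nat) => stepB a b c lo hi pre st (1 + (k : Int)))
          (lctInsert .empty lo hi 0 0,
            a * (PySem.List.pyGetD scores 0 0) ^ 2 + b * (PySem.List.pyGetD scores 0 0) + c)).2
          = dpVal a b c scores j)
      ∧ ∀ x : Int, lo ≤ x → x ≤ hi →
          lctQuery ((List.range j).foldl (fun st (k : Nat) => stepB a b c lo hi pre st (1 + (k : Int)))
              (lctInsert .empty lo hi 0 0,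
                a * (PySem.List.pyGetD scores 0 0) ^ 2 + b * (PySem.List.pyGetD scores 0 0) + c)).1
              lo hi x
            = some (((List.range j).map (fun k => lineEval a b c scores (k + 1) x)).foldl max
                (lineEval a b c scores 0 x)) := by
  intro j
  induction j with
  | zero =>
    intro _
    constructor
    · rfl
    · intro x h1 h2
      simp only [List.range_zero, List.foldl_nil, List.map_nil]
      rw [lct_query_insert LCT.empty lo hi 0 0 x h1 h2]
      simp only [lctQuery, omax]
      congr 1
      simp [lineEval, psum]
  | succ j ih =>
    intro hj
    have hjN : ((j : Int)) + 2 ≤ N := by push_cast at hj; omega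
    have hjN' : (((j + 2 : Nat)) : Int) ≤ N := by push_cast; omega
    obtain ⟨ih2, ihq⟩ := ih (by push_cast at hj ⊢; omega)
    rw [List.range_succ, List.foldl_append, List.foldl_cons, List.foldl_nil]
    set stj := (List.range j).foldl (fun st (k : Nat) => stepB a b c lo hi pre st (1 + (k : Int)))
      (lctInsert .empty lo hi 0 0,
        a * (PySem.List.pyGetD scores 0 0) ^ 2 + b * (PySem.List.pyGetD scores 0 0) + c)
      with hstj
    have hPi : PySem.List.pyGetD pre (1 + (j : Int)) 0 = psum scores (j + 1) := by
      rw [show (1 : Int) + (j : Nat) = ((j + 1 : Nat) : Int) by push_cast; ring]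
      exact hpre (j + 1) (by push_cast; omega)
    have hP : PySem.List.pyGetD pre (1 + (j : Int) + 1) 0 = psum scores (j + 2) := by
      rw [show (1 : Int) + (j : Nat) + 1 = ((j + 2 : Nat) : Int) by push_cast; ring]
      exact hpre (j + 2) hjN'
    have hline : ∀ x : Int, (-2 * a * psum scores (j + 1)) * x
          + (stj.2 + a * psum scores (j + 1) * psum scores (j + 1)
            - b * psum scores (j + 1)) = lineEval a b c scores (j + 1) x := by
      intro x
      simp only [lineEval, Nat.add_sub_cancel, ih2]
      rw [if_neg (Nat.succ_ne_zero j)]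
    have hq' : ∀ x : Int, lo ≤ x → x ≤ hi →
        lctQuery (lctInsert stj.1 lo hi (-2 * a * psum scores (j + 1))
            (stj.2 + a * psum scores (j + 1) * psum scores (j + 1) - b * psum scores (j + 1)))
            lo hi x
          = some (max (((List.range j).map (fun k => lineEval a b c scores (k + 1) x)).foldl max
                (lineEval a b c scores 0 x)) (lineEval a b c scores (j + 1) x)) := by
      intro x h1 h2
      rw [lct_query_insert stj.1 lo hi _ _ x h1 h2, ihq x h1 h2]
      simp only [omax]
      rw [hline x]
    have hfold : ∀ x : Int,
        (((List.range j ++ [j]).map (fun k => lineEval a b c scores (k + 1) x)).foldl max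
            (lineEval a b c scores 0 x))
          = max (((List.range j).map (fun k => lineEval a b c scores (k + 1) x)).foldl max
              (lineEval a b c scores 0 x)) (lineEval a b c scores (j + 1) x) := by
      intro x
      rw [List.map_append, List.foldl_append]
      rfl
    have hdv : dpVal a b c scores (j + 1)
        = maxExpr a b c scores (dpList a b c scores j) (j + 1) := by
      show (dpList a b c scores j ++ [_]).getD (j + 1) 0 = _
      rw [List.getD_eq_getElem _ _ (by simp [dpList_length]),
          List.getElem_append_right (by simp [dpList_length])]
      simp [dpList_length]
    constructor
    · simp only [stepB, hPi, hP]
      rw [hq' (psum scores (j + 2)) (hlo (j + 2) hjN') (hhi (j + 2) hjN')]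
      simp only [Option.getD_some]
      have hsplitT : maxExpr a b c scores (dpList a b c scores j) (j + 1)
          = max (((List.range j).map
                (fun k => Tf a b c scores (dpList a b c scores j) (j + 1) (k + 1))).foldl max
              (Tf a b c scores (dpList a b c scores j) (j + 1) 0))
            (Tf a b c scores (dpList a b c scores j) (j + 1) (j + 1)) := by
        rw [maxExpr, List.range_succ, List.map_append, List.foldl_append]
        rfl
      rw [hdv, hsplitT]
      set C : Int := a * psum scores (j + 2) * psum scores (j + 2)
        + b * psum scores (j + 2) + c with hC
      rw [← max_add_add_left]
      have hinit : C + lineEval a b c scores 0 (psum scores (j + 2))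
          = Tf a b c scores (dpList a b c scores j) (j + 1) 0 := by
        simp [lineEval, Tf, psum, pvF, hC]
      have hmap : (List.range j).map
            (fun k => C + lineEval a b c scores (k + 1) (psum scores (j + 2)))
          = (List.range j).map
            (fun k => Tf a b c scores (dpList a b c scores j) (j + 1) (k + 1)) := by
        apply List.map_congr_left
        intro k hk
        have hk' : k < j := List.mem_range.mp hk
        have hst := dpList_getD_stable a b c scores j k (by omega)
        simp only [lineEval, Tf, pvF, Nat.add_sub_cancel, hC,
          if_neg (Nat.succ_ne_zero k), hst]
        ring
      have hlast : C + lineEval a b c scores (j + 1) (psum scores (j + 2))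
          = Tf a b c scores (dpList a b c scores j) (j + 1) (j + 1) := by
        have hst := dpList_getD_stable a b c scores j j (le_refl j)
        simp only [lineEval, Tf, pvF, Nat.add_sub_cancel, hC,
          if_neg (Nat.succ_ne_zero j), hst]
        ring
      rw [foldl_max_map_add, hinit, hmap, ← hlast]
    · intro x h1 h2
      simp only [stepB, hPi]
      rw [hq' x h1 h2, hfold x]

-- ===== VERDICT (by name: the statement is the Claim_ definition above) =====
theorem solve_spec : Claim_equal_solve := by
  intro N a b c scores _ hp
  obtain ⟨hne, hN⟩ := hp
  unfold Spec_solve solve solve_alt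
  dsimp only
  by_cases hN1 : N ≤ 1
  · rw [PySem.List.pyRange_one_eq_nil hN1]
    simp only [List.foldl_nil]
    rw [PySem.List.pyGetD_neg_one _ _ (by simp :
      ([pvQuad a b c (PySem.List.pyGetD scores 0 0)] : List Int) ≠ [])]
    simp [pvQuad]
  · push_neg at hN1
    have h0N : 0 ≤ N := by omega
    set pre := (PySem.List.slice scores none (some N)).foldl
      (fun p s => p ++ [PySem.List.pyGetD p (-1) 0 + s]) [(0 : Int)] with hpredef
    have hpre_eq : pre = (List.range (N.toNat + 1)).map (fun j => psum scores j) := by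
      rw [hpredef, PySem.List.slice_to scores h0N, preList_eq]
      have hlen : (scores.take N.toNat).length = N.toNat := by
        simp only [List.length_take]
        omega
      rw [hlen]
      apply List.map_congr_left
      intro k hk
      have hk' : k ≤ N.toNat := by simpa using Nat.lt_succ_iff.mp (List.mem_range.mp hk)
      rw [List.take_take, Nat.min_eq_left hk']
      rfl
    have hgetPre : ∀ k : Nat, (k : Int) ≤ N → PySem.List.pyGetD pre (k : Int) 0 = psum scores k := by
      intro k hk
      rw [hpre_eq, PySem.List.pyGetD_natCast, List.getD_eq_getElem?_getD,
          List.getElem?_map, List.getElem?_range (by omega : k < N.toNat + 1)]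
      simp
    have hmemPre : ∀ k : Nat, (k : Int) ≤ N → psum scores k ∈ pre := by
      intro k hk
      rw [hpre_eq]
      exact List.mem_map.mpr ⟨k, List.mem_range.mpr (by omega), rfl⟩
    set lo := (PySem.List.min? pre (fun y => y)).getD 0 with hlodef
    set hi := (PySem.List.max? pre (fun y => y)).getD 0 with hhidef
    have hprene : pre ≠ [] := by
      rw [hpre_eq]
      simp [List.range_succ]
    have hlo : ∀ k : Nat, (k : Int) ≤ N → lo ≤ psum scores k := by
      intro k hk
      cases hmin : PySem.List.min? pre (fun y => y) with
      | none => exact absurd ((Iff.mp (PySem.List.min?_eq_none_iff pre (fun y => y)) hmin)) hprene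
      | some m =>
        rw [hlodef, hmin, Option.getD_some]
        exact PySem.List.min?_isMin hmin _ (hmemPre k hk)
    have hhi : ∀ k : Nat, (k : Int) ≤ N → psum scores k ≤ hi := by
      intro k hk
      cases hmax : PySem.List.max? pre (fun y => y) with
      | none => exact absurd ((Iff.mp (PySem.List.max?_eq_none_iff pre (fun y => y)) hmax)) hprene
      | some m =>
        rw [hhidef, hmax, Option.getD_some]
        exact PySem.List.max?_isMax hmax _ (hmemPre k hk)
    rw [PySem.List.pyRange_one 1 N, List.foldl_map, List.foldl_map]
    trans (dpVal a b c scores ((N - 1).toNat))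
    · exact (congrArg (fun l => PySem.List.pyGetD l (-1) 0)
          (foldA_eq a b c N scores ((N - 1).toNat) (by omega))).trans
        (dpList_last a b c scores _)
    · exact (foldB_inv a b c lo hi N scores pre hgetPre hlo hhi
        ((N - 1).toNat) (by omega)).1.symm
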